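-- pv_equiv track=rewrite | github.com/iyxxnjin/Algorithm | 프로그래머스/2/42626. 더 맵게/더 맵게.py | solution
-- ===== SOURCE A (Python) =====
-- import heapq
--
-- def solution(scoville, K):
--     heapq.heapify(scoville)
--     count = 0
--
--     while len(scoville) >= 2 and scoville[0] < K:
--         s1 = heapq.heappop(scoville)
--         s2 = heapq.heappop(scoville)
--
--         mixed = s1 + (s2 * 2)
--
--         heapq.heappush(scoville, mixed)
--         count += 1
--
--     if scoville[0] >= K:
--         return count
--     else:
--         return -1
-- ===== SOURCE B (Python) =====
-- def solution(scoville, K):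
--     count = 0
--     scoville = sorted(scoville)
--     while len(scoville) >= 2 and scoville[0] < K:
--         s1, s2 = scoville[0], scoville[1]
--         scoville = sorted(scoville[2:] + [s1 + 2 * s2])
--         count += 1
--     return count if scoville[0] >= K else -1
-- ===== Notes on version B (the rewrite author's own statement) =====
-- stated objective: alternative
-- what changed: Replaces the heapq binary heap with a plain list that is re-sorted each iteration, taking the two smallest as the first two elements and indexing [0] for the final check; A mutates its argument into heap order while B leaves the caller's list untouched.
import Mathlib
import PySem

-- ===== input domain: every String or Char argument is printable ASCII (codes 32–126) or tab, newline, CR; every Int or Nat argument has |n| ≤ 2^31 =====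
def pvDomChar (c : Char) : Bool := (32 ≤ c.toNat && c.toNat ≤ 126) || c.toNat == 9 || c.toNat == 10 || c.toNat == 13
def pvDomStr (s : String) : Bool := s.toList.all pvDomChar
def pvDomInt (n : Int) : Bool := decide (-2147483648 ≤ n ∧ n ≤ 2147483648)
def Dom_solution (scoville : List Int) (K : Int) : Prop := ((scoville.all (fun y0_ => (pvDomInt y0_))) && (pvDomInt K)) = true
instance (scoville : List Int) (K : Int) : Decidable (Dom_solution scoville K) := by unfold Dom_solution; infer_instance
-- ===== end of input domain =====

-- B re-sorts a plain list each round instead of using a binary heap; return-value equivalence only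
-- (A heapifies its argument in place, B leaves the caller's list untouched).

-- ===== PORT A =====
-- heapq is modelled semantically on Int: a heap is its multiset of elements, the root
-- scoville[0] is the minimum, heappop removes one occurrence of the minimum and returns it,
-- heappush appends, heapify reorders in place (multiset unchanged).  Exact for the return
-- value on every input where Python returns (duplicate Ints are indistinguishable).
def heapRoot (l : List Int) : Int := (l.min?).getD 0   -- scoville[0] of a heap; default unreachable (guard/Pre_ give nonemptiness)

lemma heapRoot_mem (l : List Int) (h : l ≠ []) : heapRoot l ∈ l := by
  cases hmin : l.min? with
  | none => exact absurd (List.min?_eq_none_iff.mp hmin) h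
  | some a => simpa [heapRoot, hmin] using List.min?_mem hmin

def solGoA (l : List Int) (K count : Int) : Int :=
  if h : 2 ≤ l.length ∧ heapRoot l < K then
    let s1 := heapRoot l               -- s1 = heapq.heappop(scoville)
    let l1 := l.erase s1
    let s2 := heapRoot l1              -- s2 = heapq.heappop(scoville)
    let l2 := l1.erase s2
    solGoA (l2 ++ [s1 + s2 * 2]) K (count + 1)   -- mixed = s1 + (s2 * 2); heapq.heappush
  else
    if heapRoot l ≥ K then count else -1         -- return count if scoville[0] >= K else -1
termination_by l.length
decreasing_by
  have h1 : l ≠ [] := by intro he; rw [he] at h; simp at h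
  have hm1 := List.length_erase_of_mem (heapRoot_mem l h1)
  have h2 : l.erase (heapRoot l) ≠ [] := by
    intro he
    have := congrArg List.length he
    rw [hm1] at this; simp at this; omega
  have hm2 := List.length_erase_of_mem (heapRoot_mem _ h2)
  simp only [List.length_append, List.length_cons, List.length_nil, hm2, hm1]
  omega

def solution (scoville : List Int) (K : Int) : Int :=
  solGoA scoville K 0        -- heapq.heapify(scoville) (in place); count = 0; the while loop; final check

-- ===== PORT B =====
def solGoB (l : List Int) (K count : Int) : Int :=
  if h : 2 ≤ l.length ∧ l.headD 0 < K then        -- while len(scoville) >= 2 and scoville[0] < K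
    let s1 := l.headD 0                           -- s1 = scoville[0]
    let s2 := l.tail.headD 0                      -- s2 = scoville[1]
    -- scoville = sorted(scoville[2:] + [s1 + 2 * s2])   (l.drop 2 is exact for the literal slice [2:])
    solGoB (PySem.List.sorted (l.drop 2 ++ [s1 + 2 * s2]) (fun x => x) false) K (count + 1)
  else
    if l.headD 0 ≥ K then count else -1           -- return count if scoville[0] >= K else -1
termination_by l.length
decreasing_by
  simp only [PySem.List.length_sorted, List.length_append, List.length_drop, List.length_cons,
    List.length_nil]
  omega

def solution_alt (scoville : List Int) (K : Int) : Int :=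
  solGoB (PySem.List.sorted scoville (fun x => x) false) K 0    -- scoville = sorted(scoville); count = 0

-- ===== PRECONDITION & SPEC =====
-- Pre_ excludes only the empty list, on which Python A (and B) raise IndexError.
def Pre_solution (scoville : List Int) (K : Int) : Prop := scoville ≠ []
instance (scoville : List Int) (K : Int) : Decidable (Pre_solution scoville K) := by unfold Pre_solution; infer_instance
def pvWitness_solution : List Int × Int := ([1, 2, 3, 9, 10, 12], 7)

def Spec_solution (scoville : List Int) (K : Int) (out : Int) : Prop := out = solution_alt scoville K
instance (scoville : List Int) (K : Int) (out : Int) : Decidable (Spec_solution scoville K out) := by unfold Spec_solution; infer_instance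

-- ===== CLAIM (what is proved, stated in full; the proofs are below) =====
def Claim_equal_solution : Prop := ∀ (scoville : List Int) (K : Int), Dom_solution scoville K → Pre_solution scoville K → Spec_solution scoville K (solution scoville K)

-- ===== LEMMAS AND PROOFS =====

-- the head of a (≤)-sorted list that is a permutation of lA is A's heap root (the minimum of lA)
lemma heapRoot_eq_head (lA : List Int) (a : Int) (t : List Int)
    (hperm : (a :: t).Perm lA) (hpw : (a :: t).Pairwise (· ≤ ·)) :
    heapRoot lA = a := by
  have hmem : a ∈ lA := hperm.mem_iff.mp (by simp)
  have hle : ∀ x ∈ lA, a ≤ x := by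
    intro x hx
    rcases List.mem_cons.mp (hperm.mem_iff.mpr hx) with rfl | hx''
    · exact le_refl x
    · exact (List.pairwise_cons.mp hpw).1 x hx''
  have : lA.min? = some a := List.min?_eq_some_iff.mpr ⟨hmem, hle⟩
  simp [heapRoot, this]

-- main loop invariant: A's heap state and B's (pre-sort) state are permutations, counts equal
lemma go_eq (n : Nat) : ∀ (lA lB : List Int) (K c : Int), lA.length = n → lA.Perm lB →
    solGoA lA K c = solGoB (PySem.List.sorted lB (fun x => x) false) K c := by
  induction n using Nat.strong_induction_on with
  | _ n ih =>
    intro lA lB K c hlen hperm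
    set S := PySem.List.sorted lB (fun x => x) false with hS
    have hSperm : S.Perm lA := (PySem.List.sorted_perm ..).trans hperm.symm
    have hSpw : S.Pairwise (· ≤ ·) := by
      simpa using PySem.List.sorted_pairwise (xs := lB) (key := fun x => x)
    have hSlen : S.length = lA.length := hSperm.length_eq
    rw [solGoA, solGoB]
    match S, hSperm, hSpw, hSlen with
    | [], hSperm, _, hSlen =>
      have hA : lA = [] := List.length_eq_zero_iff.mp (by simpa using hSlen.symm)
      subst hA
      simp [heapRoot]
    | [a], hSperm, _, hSlen =>
      have hroot : heapRoot lA = a := heapRoot_eq_head lA a [] hSperm (by simp)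
      have h1 : lA.length = 1 := by simpa using hSlen.symm
      rw [dif_neg (by intro hc; rw [h1] at hc; exact absurd hc.1 (by norm_num)),
        dif_neg (by intro hc; exact absurd hc.1 (by simp))]
      simp [hroot]
    | a :: b :: t, hSperm, hSpw, hSlen =>
      have hlen2 : 2 ≤ lA.length := by
        have := hSlen.symm; simp at this; omega
      have hroot : heapRoot lA = a := heapRoot_eq_head lA a (b :: t) hSperm hSpw
      have hE1 : (b :: t).Perm (lA.erase a) := by
        have := hSperm.erase a; simpa using this
      have hpw' : (b :: t).Pairwise (· ≤ ·) := (List.pairwise_cons.mp hSpw).2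
      have hroot2 : heapRoot (lA.erase a) = b := heapRoot_eq_head _ b t hE1 hpw'
      by_cases hK : a < K
      · rw [dif_pos ⟨hlen2, by rw [hroot]; exact hK⟩,
          dif_pos ⟨by simp, by simpa using hK⟩]
        simp only [hroot, hroot2, List.headD_cons, List.tail_cons, List.drop_succ_cons,
          List.drop_zero]
        have hperm' : ((lA.erase a).erase b ++ [a + b * 2]).Perm (t ++ [a + 2 * b]) := by
          have ht : t.Perm ((lA.erase a).erase b) := by
            have := hE1.erase b; simpa using this
          have h2b : a + b * 2 = a + 2 * b := by ring
          rw [h2b]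
          exact ht.symm.append (List.Perm.refl _)
        have hlen' : ((lA.erase a).erase b ++ [a + b * 2]).length = n - 1 := by
          have hma : a ∈ lA := hSperm.mem_iff.mp (by simp)
          have hmb : b ∈ lA.erase a := hE1.mem_iff.mp (by simp)
          simp only [List.length_append, List.length_cons, List.length_nil,
            List.length_erase_of_mem hmb, List.length_erase_of_mem hma]
          omega
        exact ih (n - 1) (by omega) _ _ K (c + 1) hlen' hperm'
      · rw [dif_neg (by rw [hroot]; tauto), dif_neg (by intro hc; exact hK (by simpa using hc.2))]
        simp [hroot]

-- ===== VERDICT (by name: the statement is the Claim_ definition above) =====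
theorem solution_spec : Claim_equal_solution := by
  intro scoville K _ _
  unfold Spec_solution solution solution_alt
  exact go_eq scoville.length scoville scoville K 0 rfl (List.Perm.refl _)
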